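-- pv_equiv track=rewrite | github.com/Chats30/dcpProjectS1 | abc_parser.py | parse_single_tune
-- ===== SOURCE A (Python) =====
-- from typing import List, Dict  # importing lists and dicts for type hinting
--
-- def parse_single_tune(tune_text: str) -> Dict[str, str]:
--     """
--     Parse a single tune's ABC notation.
--
--     Args:
--         tune_text: ABC notation text for one tune
--
--     Returns:
--         Dictionary with tune metadata
--     """
--     tune_dict = {
--         'reference_number': '',
--         'title': '',
--         'type': '',
--         'meter': '',
--         'key': '',
--         'abc_notation': tune_text
--     }
--
--     lines = tune_text.split('\n')
--
--     for line in lines: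
--         line = line.strip()
--
--         # Reference number (X:)
--         if line.startswith('X:'):
--             tune_dict['reference_number'] = line[2:].strip()
--
--         # Title (T:) - take the first one if multiple
--         elif line.startswith('T:') and not tune_dict['title']:
--             tune_dict['title'] = line[2:].strip()
--
--         # Type/Rhythm (R:)
--         elif line.startswith('R:'):
--             tune_dict['type'] = line[2:].strip()
--
--         # Meter (M:)
--         elif line.startswith('M:'):
--             tune_dict['meter'] = line[2:].strip()
--
--         # Key (K:)
--         elif line.startswith('K:'):
--             tune_dict['key'] = line[2:].strip()
--
--     return tune_dict
-- ===== SOURCE B (Python) =====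
-- def parse_single_tune(tune_text: str) -> dict:
--     lines = [ln.strip() for ln in tune_text.split('\n')]
--
--     def vals(prefix):
--         return [ln[2:].strip() for ln in lines if ln.startswith(prefix)]
--
--     def last(prefix):
--         vs = vals(prefix)
--         return vs[-1] if vs else ''
--
--     return {
--         'reference_number': last('X:'),
--         'title': next((v for v in vals('T:') if v), ''),
--         'type': last('R:'),
--         'meter': last('M:'),
--         'key': last('K:'),
--         'abc_notation': tune_text,
--     }
-- ===== Notes on version B (the rewrite author's own statement) =====
-- stated objective: alternative
-- what changed: Replaces A's single pass with a stateful elif chain over a mutable dict by per-field scans: the stripped lines are split once, then each field is extracted by its own filter/map scan (last match for X:/R:/M:/K:, first non-empty match for T:), and the dict is assembled from these results.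
import Mathlib
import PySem

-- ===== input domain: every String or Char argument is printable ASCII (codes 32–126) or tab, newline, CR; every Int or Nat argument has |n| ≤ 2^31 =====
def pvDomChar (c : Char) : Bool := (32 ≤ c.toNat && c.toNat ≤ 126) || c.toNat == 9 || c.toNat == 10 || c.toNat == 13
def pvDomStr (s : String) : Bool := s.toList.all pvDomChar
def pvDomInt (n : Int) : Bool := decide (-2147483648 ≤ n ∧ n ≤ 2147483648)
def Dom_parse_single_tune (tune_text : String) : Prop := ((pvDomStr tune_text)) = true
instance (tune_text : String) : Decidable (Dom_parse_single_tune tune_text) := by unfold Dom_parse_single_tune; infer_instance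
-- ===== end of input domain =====

-- B replaces A's single elif pass with per-field scans over the stripped lines (alternative decomposition, same cost).

-- ===== PORT A =====
-- one loop iteration of A: strip the line, then the elif chain of dict updates
def pvStepA (d : PySem.Dict String String) (line : String) : PySem.Dict String String :=
  let l := PySem.Str.strip line
  if PySem.Str.startswith l "X:" then
    d.insert "reference_number" (PySem.Str.strip (PySem.Str.slice l (some 2) none))
  else if PySem.Str.startswith l "T:" && ((d.getD "title" "") == "") then
    d.insert "title" (PySem.Str.strip (PySem.Str.slice l (some 2) none))
  else if PySem.Str.startswith l "R:" then
    d.insert "type" (PySem.Str.strip (PySem.Str.slice l (some 2) none))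
  else if PySem.Str.startswith l "M:" then
    d.insert "meter" (PySem.Str.strip (PySem.Str.slice l (some 2) none))
  else if PySem.Str.startswith l "K:" then
    d.insert "key" (PySem.Str.strip (PySem.Str.slice l (some 2) none))
  else d

def parse_single_tune (tune_text : String) : List (String × String) :=
  let tune_dict : PySem.Dict String String := PySem.Dict.ofList
    [("reference_number", ""), ("title", ""), ("type", ""), ("meter", ""),
     ("key", ""), ("abc_notation", tune_text)]
  let lines := (PySem.Str.split? tune_text "\n").getD []
  (lines.foldl pvStepA tune_dict).items

-- ===== PORT B =====
-- vals(prefix): values after the 2-char prefix among the (pre-stripped) lines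
def pvVals (lines : List String) (p : String) : List String :=
  (lines.filter (fun ln => PySem.Str.startswith ln p)).map
    (fun ln => PySem.Str.strip (PySem.Str.slice ln (some 2) none))

-- last(prefix): last matching value, '' if none
def pvLastVal (lines : List String) (p : String) : String :=
  ((pvVals lines p).getLast?).getD ""

-- next((v for v in vs if v), '')
def pvFirstTruthy : List String → String
  | [] => ""
  | v :: vs => if v == "" then pvFirstTruthy vs else v

def parse_single_tune_alt (tune_text : String) : List (String × String) :=
  let lines := ((PySem.Str.split? tune_text "\n").getD []).map PySem.Str.strip
  [("reference_number", pvLastVal lines "X:"),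
   ("title", pvFirstTruthy (pvVals lines "T:")),
   ("type", pvLastVal lines "R:"),
   ("meter", pvLastVal lines "M:"),
   ("key", pvLastVal lines "K:"),
   ("abc_notation", tune_text)]

-- ===== PRECONDITION & SPEC =====
def Spec_parse_single_tune (tune_text : String) (out : List (String × String)) : Prop := out = parse_single_tune_alt tune_text
instance (tune_text : String) (out : List (String × String)) : Decidable (Spec_parse_single_tune tune_text out) := by unfold Spec_parse_single_tune; infer_instance

-- ===== CLAIM (what is proved, stated in full; the proofs are below) =====
def Claim_equal_parse_single_tune : Prop := ∀ (tune_text : String), Dom_parse_single_tune tune_text → Spec_parse_single_tune tune_text (parse_single_tune tune_text)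

-- ===== LEMMAS AND PROOFS =====

-- two 2-char ":"-prefixes with different first characters cannot both match
theorem pvExcl (a b : Char) {l : List Char} (hab : b ≠ a)
    (h : PySem.Chars.startswith l [a, ':'] = true) :
    PySem.Chars.startswith l [b, ':'] = false := by
  rw [PySem.Chars.startswith_iff] at h
  rcases h with ⟨u, hu⟩
  subst hu
  rw [Bool.eq_false_iff]
  intro h2
  rw [PySem.Chars.startswith_iff] at h2
  rcases h2 with ⟨w, hw⟩
  simp at hw
  exact hab hw.1

theorem pvVals_cons (l : String) (L : List String) (p : String) :
    pvVals (l :: L) p =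
      if PySem.Str.startswith l p then
        (PySem.Str.strip (PySem.Str.slice l (some 2) none)) :: pvVals L p
      else pvVals L p := by
  simp only [pvVals, List.filter_cons]
  split <;> simp

theorem pvLastD_cons (v a : String) (vs : List String) :
    ((v :: vs).getLast?).getD a = (vs.getLast?).getD v := by
  cases vs <;> simp [List.getLast?_cons]

theorem parse_single_tune_invariant (ls : List String) (a t r m k z : String) :
    (ls.foldl pvStepA (PySem.Dict.mk
      [("reference_number", a), ("title", t), ("type", r), ("meter", m),
       ("key", k), ("abc_notation", z)])).items =
    [("reference_number", ((pvVals (ls.map PySem.Str.strip) "X:").getLast?).getD a),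
     ("title", if t == "" then pvFirstTruthy (pvVals (ls.map PySem.Str.strip) "T:") else t),
     ("type", ((pvVals (ls.map PySem.Str.strip) "R:").getLast?).getD r),
     ("meter", ((pvVals (ls.map PySem.Str.strip) "M:").getLast?).getD m),
     ("key", ((pvVals (ls.map PySem.Str.strip) "K:").getLast?).getD k),
     ("abc_notation", z)] := by
  induction ls generalizing a t r m k with
  | nil =>
    simp [pvVals, pvFirstTruthy]
  | cons ln ls ih =>
    simp only [List.foldl_cons, List.map_cons, pvVals_cons]
    set l := PySem.Str.strip ln with hl
    set v := PySem.Str.strip (PySem.Str.slice l (some 2) none) with hv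
    by_cases hx : PySem.Chars.startswith l.toList ['X', ':'] = true
    · have eT := pvExcl 'X' 'T' (by decide) hx
      have eR := pvExcl 'X' 'R' (by decide) hx
      have eM := pvExcl 'X' 'M' (by decide) hx
      have eK := pvExcl 'X' 'K' (by decide) hx
      rw [show pvStepA (PySem.Dict.mk
            [("reference_number", a), ("title", t), ("type", r), ("meter", m),
             ("key", k), ("abc_notation", z)]) ln =
          PySem.Dict.mk
            [("reference_number", v), ("title", t), ("type", r), ("meter", m),
             ("key", k), ("abc_notation", z)] from by
        simp [pvStepA, ← hl, ← hv, hx, PySem.Dict.insert]]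
      rw [ih v t r m k]
      simp [hx, eT, eR, eM, eK, pvLastD_cons]
    · by_cases hT : PySem.Chars.startswith l.toList ['T', ':'] = true
      · have eR := pvExcl 'T' 'R' (by decide) hT
        have eM := pvExcl 'T' 'M' (by decide) hT
        have eK := pvExcl 'T' 'K' (by decide) hT
        by_cases ht : t = ""
        · rw [show pvStepA (PySem.Dict.mk
                [("reference_number", a), ("title", t), ("type", r), ("meter", m),
                 ("key", k), ("abc_notation", z)]) ln =
              PySem.Dict.mk
                [("reference_number", a), ("title", v), ("type", r), ("meter", m),
                 ("key", k), ("abc_notation", z)] from by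
            simp [pvStepA, ← hl, ← hv, hx, hT, ht, PySem.Dict.insert,
              PySem.Dict.getD, PySem.Dict.get?]]
          rw [ih a v r m k]
          simp [hx, hT, eR, eM, eK, ht, pvFirstTruthy]
        · rw [show pvStepA (PySem.Dict.mk
                [("reference_number", a), ("title", t), ("type", r), ("meter", m),
                 ("key", k), ("abc_notation", z)]) ln =
              PySem.Dict.mk
                [("reference_number", a), ("title", t), ("type", r), ("meter", m),
                 ("key", k), ("abc_notation", z)] from by
            simp [pvStepA, ← hl, hx, hT, ht, eR, eM, eK, PySem.Dict.getD, PySem.Dict.get?]]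
          rw [ih a t r m k]
          simp [hx, eR, eM, eK, ht]
      · by_cases hR : PySem.Chars.startswith l.toList ['R', ':'] = true
        · have eM := pvExcl 'R' 'M' (by decide) hR
          have eK := pvExcl 'R' 'K' (by decide) hR
          rw [show pvStepA (PySem.Dict.mk
                [("reference_number", a), ("title", t), ("type", r), ("meter", m),
                 ("key", k), ("abc_notation", z)]) ln =
              PySem.Dict.mk
                [("reference_number", a), ("title", t), ("type", v), ("meter", m),
                 ("key", k), ("abc_notation", z)] from by
            simp [pvStepA, ← hl, ← hv, hx, hT, hR, PySem.Dict.insert]]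
          rw [ih a t v m k]
          simp [hx, hT, hR, eM, eK, pvLastD_cons]
        · by_cases hM : PySem.Chars.startswith l.toList ['M', ':'] = true
          · have eK := pvExcl 'M' 'K' (by decide) hM
            rw [show pvStepA (PySem.Dict.mk
                  [("reference_number", a), ("title", t), ("type", r), ("meter", m),
                   ("key", k), ("abc_notation", z)]) ln =
                PySem.Dict.mk
                  [("reference_number", a), ("title", t), ("type", r), ("meter", v),
                   ("key", k), ("abc_notation", z)] from by
              simp [pvStepA, ← hl, ← hv, hx, hT, hR, hM, PySem.Dict.insert]]
            rw [ih a t r v k]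
            simp [hx, hT, hR, hM, eK, pvLastD_cons]
          · by_cases hK : PySem.Chars.startswith l.toList ['K', ':'] = true
            · rw [show pvStepA (PySem.Dict.mk
                    [("reference_number", a), ("title", t), ("type", r), ("meter", m),
                     ("key", k), ("abc_notation", z)]) ln =
                  PySem.Dict.mk
                    [("reference_number", a), ("title", t), ("type", r), ("meter", m),
                     ("key", v), ("abc_notation", z)] from by
                simp [pvStepA, ← hl, ← hv, hx, hT, hR, hM, hK, PySem.Dict.insert]]
              rw [ih a t r m v]
              simp [hx, hT, hR, hM, hK, pvLastD_cons]
            · rw [show pvStepA (PySem.Dict.mk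
                    [("reference_number", a), ("title", t), ("type", r), ("meter", m),
                     ("key", k), ("abc_notation", z)]) ln =
                  PySem.Dict.mk
                    [("reference_number", a), ("title", t), ("type", r), ("meter", m),
                     ("key", k), ("abc_notation", z)] from by
                simp [pvStepA, ← hl, hx, hT, hR, hM, hK]]
              rw [ih a t r m k]
              simp [hx, hT, hR, hM, hK]

-- ===== VERDICT (by name: the statement is the Claim_ definition above) =====
theorem parse_single_tune_spec : Claim_equal_parse_single_tune := by
  intro s _
  show parse_single_tune s = parse_single_tune_alt s
  rw [parse_single_tune, parse_single_tune_alt]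
  rw [show PySem.Dict.ofList
      [("reference_number", ""), ("title", ""), ("type", ""), ("meter", ""),
       ("key", ""), ("abc_notation", s)] =
    PySem.Dict.mk
      [("reference_number", ""), ("title", ""), ("type", ""), ("meter", ""),
       ("key", ""), ("abc_notation", s)] from by
    simp [PySem.Dict.ofList, PySem.Dict.update, PySem.Dict.empty, PySem.Dict.insert]]
  rw [parse_single_tune_invariant]
  simp [pvLastVal]
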